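/- GENERATED by c/gen_decode.py: decode facts of the image, one per distinct instruction byte string. -/
import UserX.DecodeImage

#decode_all Vorbis.Dec
  "0f114370"  -- movups XMMWORD PTR [rbx+0x70],xmm0
  "0f8437010000"  -- je 111a9d
  "0f84e5090000"  -- je 10f8d5
  "0f8805010000"  -- js 10d2ef
  "0f8ef4000000"  -- jle 10b324
  "0fb683d4060000"  -- movzx eax,BYTE PTR [rbx+0x6d4]
  "394c2418"  -- cmp DWORD PTR [rsp+0x18],ecx
  "410fafdc"  -- imul ebx,r12d
  "4139dd"  -- cmp r13d,ebx
  "418807"  -- mov BYTE PTR [r15],al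
  "418b442404"  -- mov eax,DWORD PTR [r12+0x4]
  "41c6461b00"  -- mov BYTE PTR [r14+0x1b],0x0
  "42c684344001000000"  -- mov BYTE PTR [rsp+r14*1+0x140],0x0
  "4439a3d0010000"  -- cmp DWORD PTR [rbx+0x1d0],r12d
  "44896c2418"  -- mov DWORD PTR [rsp+0x18],r13d
  "4489eb"  -- mov ebx,r13d
  "448b8d20ffffff"  -- mov r9d,DWORD PTR [rbp-0xe0]
  "4529ec"  -- sub r12d,r13d
  "4589fd"  -- mov r13d,r15d
  "4801d0"  -- add rax,rdx
  "48635c2410"  -- movsxd rbx,DWORD PTR [rsp+0x10]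
  "4881ecf8000000"  -- sub rsp,0xf8
  "48890425f8ff3f00"  -- mov QWORD PTR ds:0x3ffff8,rax
  "4889d0"  -- mov rax,rdx
  "488b6c2440"  -- mov rbp,QWORD PTR [rsp+0x40]
  "488d1c40"  -- lea rbx,[rax+rax*2]
  "488d7b10"  -- lea rdi,[rbx+0x10]
  "488d7f30"  -- lea rdi,[rdi+0x30]
  "488dbbe4060000"  -- lea rdi,[rbx+0x6e4]
  "488dbfe8040000"  -- lea rdi,[rdi+0x4e8]
  "48c7842480000000b38ab541"  -- mov QWORD PTR [rsp+0x80],0x41b58ab3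
  "4963d5"  -- movsxd rdx,r13d
  "4989f5"  -- mov r13,rsi
  "498d7c5d00"  -- lea rdi,[r13+rbx*2+0x0]
  "498dbf38010000"  -- lea rdi,[r15+0x138]
  "4a8dbc3440010000"  -- lea rdi,[rsp+r14*1+0x140]
  "4c39fd"  -- cmp rbp,r15
  "4c89e1"  -- mov rcx,r12
  "4c8bad58ffffff"  -- mov r13,QWORD PTR [rbp-0xa8]
  "4c8db443e4010000"  -- lea r14,[rbx+rax*2+0x1e4]
  "4d8d3c1e"  -- lea r15,[r14+rbx*1]
  "660f2ec1"  -- ucomisd xmm0,xmm1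
  "66410f6ef6"  -- movd xmm6,r14d
  "6685ed"  -- test bp,bp
  "7426"  -- je 10b147
  "7513"  -- jne 1004bc
  "7801"  -- js 1016e7
  "7e1e"  -- jle 115714
  "803b00"  -- cmp BYTE PTR [rbx],0x0
  "83bd20ffffff02"  -- cmp DWORD PTR [rbp-0xe0],0x2
  "8903"  -- mov DWORD PTR [rbx],eax
  "897c243c"  -- mov DWORD PTR [rsp+0x3c],edi
  "89f8"  -- mov eax,edi
  "8b5c247c"  -- mov ebx,DWORD PTR [rsp+0x7c]
  "8b959c000000"  -- mov edx,DWORD PTR [rbp+0x9c]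
  "b9caffffff"  -- mov ecx,0xffffffca
  "c1fa03"  -- sar edx,0x3
  "c7830000c000f1f1f1f1"  -- mov DWORD PTR [rbx+0xc00000],0xf1f1f1f1
  "e800b0feff"  -- call 1003c0
  "e80aaffeff"  -- call 1008e0
  "e814ecffff"  -- call 112da0
  "e81db5ffff"  -- call 100640
  "e828a6ffff"  -- call 100640
  "e83078ffff"  -- call 100640
  "e83aebfeff"  -- call 100300
  "e846b4ffff"  -- call 100640
  "e850c4ffff"  -- call 100800
  "e85bf4feff"  -- call 100300
  "e869f0feff"  -- call 100300
  "e8755effff"  -- call 10c6c0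
  "e87f8fffff"  -- call 100640
  "e88afbffff"  -- call 100059
  "e894b9feff"  -- call 100640
  "e89ef8feff"  -- call 103d00
  "e8a965ffff"  -- call 100640
  "e8b2d6feff"  -- call 103d00
  "e8bd1cffff"  -- call 104c60
  "e8c852ffff"  -- call 100640
  "e8d0d9feff"  -- call 103d00
  "e8db4cffff"  -- call 108f20
  "e8e52cffff"  -- call 104100
  "e8ed71ffff"  -- call 100720
  "e8f818ffff"  -- call 100640
  "e90fffffff"  -- jmp 10f19f
  "e95a010000"  -- jmp 102752
  "e9a6feffff"  -- jmp 10efbb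
  "e9fad4ffff"  -- jmp 113b22
  "eb8e"  -- jmp 1136d9
  "ebea"  -- jmp 101daa
  "f20f58cb"  -- addsd xmm1,xmm3
  "f20f5e1d80e10100"  -- divsd xmm3,QWORD PTR [rip+0x1e180]
  "f30f10542418"  -- movss xmm2,DWORD PTR [rsp+0x18]
  "f30f107bd8"  -- movss xmm7,DWORD PTR [rbx-0x28]
  "f30f11542414"  -- movss DWORD PTR [rsp+0x14],xmm2
  "f30f117c2410"  -- movss DWORD PTR [rsp+0x10],xmm7
  "f30f58f2"  -- addss xmm6,xmm2
  "f30f5c43e4"  -- subss xmm0,DWORD PTR [rbx-0x1c]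
  "f3410f104500"  -- movss xmm0,DWORD PTR [r13+0x0]
  "f3420f5904ad80061200"  -- mulss xmm0,DWORD PTR [r13*4+0x120680]
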